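-- pv_equiv track=rewrite | github.com/MichalFedorek420/II-rok-python | mocks2/p5.py | f
-- ===== SOURCE A (Python) =====
-- def f(arr2d):
--     x = []
--     counter = 0
--     for i in  arr2d:
--         for j in i:
--             x.append(j)
--     for j in range(len(x)-1):
--         if x[j] ** 2 == x[j+1]:
--             counter += 1
--     return counter
-- ===== SOURCE B (Python) =====
-- def f(arr2d):
--     sentinel = object()
--     prev = sentinel
--     counter = 0
--     for row in arr2d:
--         for j in row:
--             if prev is not sentinel and prev ** 2 == j:
--                 counter += 1
--             prev = j
--     return counter
-- ===== Notes on version B (the rewrite author's own statement) =====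
-- stated objective: alternative
-- what changed: Replaces the flatten-then-index-scan (build flat list, then loop over range(len-1) with x[j], x[j+1]) by a single streaming pass over the nested lists that carries the previous element in a sentinel-initialized variable, never building the intermediate flat list.
import Mathlib
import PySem

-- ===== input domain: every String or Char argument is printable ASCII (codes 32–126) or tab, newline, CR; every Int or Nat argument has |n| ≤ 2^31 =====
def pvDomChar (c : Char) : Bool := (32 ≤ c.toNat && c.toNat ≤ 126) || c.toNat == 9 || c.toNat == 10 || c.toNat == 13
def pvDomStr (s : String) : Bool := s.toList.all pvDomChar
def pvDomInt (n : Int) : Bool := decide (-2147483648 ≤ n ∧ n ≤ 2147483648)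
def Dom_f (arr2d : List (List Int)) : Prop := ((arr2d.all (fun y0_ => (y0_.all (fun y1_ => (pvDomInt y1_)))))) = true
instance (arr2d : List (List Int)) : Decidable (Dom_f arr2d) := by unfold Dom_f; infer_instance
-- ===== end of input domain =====

-- B replaces A's flatten-then-index-scan by one streaming pass carrying the previous
-- element in an Option (Python: object() sentinel); same O(n) cost, no intermediate list.

-- ===== PORT A =====
-- A: build flat list x by appending, then loop j in range(len(x)-1) comparing x[j]**2 with x[j+1].
def f (arr2d : List (List Int)) : Int :=
  let x : List Int := arr2d.foldl (fun acc i => i.foldl (fun acc j => acc ++ [j]) acc) []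
  (PySem.List.pyRange 0 ((x.length : Int) - 1) 1).foldl
    (fun counter j =>
      if (PySem.List.pyGetD x j 0) ^ 2 = PySem.List.pyGetD x (j + 1) 0 then counter + 1 else counter)
    0

-- ===== PORT B =====
-- B: single pass over rows and elements with state (prev?, counter); prev starts as the sentinel (none).
def f_altStep (s : Option Int × Int) (j : Int) : Option Int × Int :=
  (some j,
   match s.1 with
   | some p => if p ^ 2 = j then s.2 + 1 else s.2
   | none => s.2)

def f_alt (arr2d : List (List Int)) : Int :=
  (arr2d.foldl (fun s row => row.foldl f_altStep s) (none, 0)).2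

-- ===== PRECONDITION & SPEC =====
def Spec_f (arr2d : List (List Int)) (out : Int) : Prop := out = f_alt arr2d
instance (arr2d : List (List Int)) (out : Int) : Decidable (Spec_f arr2d out) := by unfold Spec_f; infer_instance

-- ===== CLAIM (what is proved, stated in full; the proofs are below) =====
def Claim_equal_f : Prop := ∀ (arr2d : List (List Int)), Dom_f arr2d → Spec_f arr2d (f arr2d)

-- ===== LEMMAS AND PROOFS =====

/-- The common reference value: count of adjacent pairs (a, b) with a² = b. -/
def countAdj : List Int → Int
  | a :: b :: t => (if a ^ 2 = b then 1 else 0) + countAdj (b :: t)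
  | _ => 0

-- A's appending inner/outer loops build the flatten.
theorem inner_append (row : List Int) (acc : List Int) :
    row.foldl (fun acc j => acc ++ [j]) acc = acc ++ row := by
  induction row generalizing acc with
  | nil => simp
  | cons a t ih => rw [List.foldl_cons, ih]; simp

theorem build_eq_flatten (arr2d : List (List Int)) (acc : List Int) :
    arr2d.foldl (fun acc i => i.foldl (fun acc j => acc ++ [j]) acc) acc = acc ++ arr2d.flatten := by
  induction arr2d generalizing acc with
  | nil => simp
  | cons r t ih => rw [List.foldl_cons, inner_append, ih]; simp

-- A's index loop over the flat list computes countAdj, via the Nat range.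
theorem natScan_eq_countAdj (xs : List Int) (c : Int) :
    (List.range (xs.length - 1)).foldl
      (fun counter k =>
        if (xs.getD k 0) ^ 2 = xs.getD (k + 1) 0 then counter + 1 else counter) c
    = c + countAdj xs := by
  induction xs generalizing c with
  | nil => simp [countAdj]
  | cons a t ih =>
    cases t with
    | nil => simp [countAdj]
    | cons b u =>
      have hlen : (a :: b :: u).length - 1 = ((b :: u).length - 1) + 1 := by
        simp [List.length]
      rw [hlen, List.range_succ_eq_map, List.foldl_cons, List.foldl_map]
      simp only [List.getD_cons_zero, List.getD_cons_succ]
      have ih' := ih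
      simp only [List.getD_cons_succ] at ih'
      rw [ih']
      simp only [countAdj]
      split_ifs <;> ring

-- A's pyRange/pyGetD loop on xs equals countAdj xs.
theorem pyScan_eq_countAdj (xs : List Int) :
    (PySem.List.pyRange 0 ((xs.length : Int) - 1) 1).foldl
      (fun counter j =>
        if (PySem.List.pyGetD xs j 0) ^ 2 = PySem.List.pyGetD xs (j + 1) 0 then counter + 1
        else counter) 0 = countAdj xs := by
  cases xs with
  | nil =>
    rw [PySem.List.pyRange_one_eq_nil (by norm_num)]
    simp [countAdj]
  | cons a t =>
    have hlen : (((a :: t).length : Int)) - 1 = (t.length : Int) := by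
      simp
    rw [hlen, PySem.List.pyRange_one]
    have hr : ((t.length : Int) - 0).toNat = t.length := by simp
    rw [hr, List.foldl_map]
    have hcong :
        (List.range t.length).foldl
          (fun (counter : Int) (k : Nat) =>
            if (PySem.List.pyGetD (a :: t) (0 + (k : Int)) 0) ^ 2
               = PySem.List.pyGetD (a :: t) (0 + (k : Int) + 1) 0
            then counter + 1 else counter) 0
        = (List.range t.length).foldl
          (fun (counter : Int) (k : Nat) =>
            if ((a :: t : List Int).getD k 0) ^ 2 = (a :: t : List Int).getD (k + 1) 0
            then counter + 1 else counter) (0 : Int) := by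
      apply PySem.List.foldl_congr_mem
      intro acc k _
      simp only [zero_add]
      have h2 : ((k : Int)) + 1 = (((k + 1 : Nat)) : Int) := by push_cast; ring
      rw [h2, PySem.List.pyGetD_natCast, PySem.List.pyGetD_natCast]
    refine hcong.trans ?_
    simpa using natScan_eq_countAdj (a :: t) 0

theorem f_eq_countAdj (arr2d : List (List Int)) : f arr2d = countAdj arr2d.flatten := by
  unfold f
  rw [build_eq_flatten]
  simpa using pyScan_eq_countAdj arr2d.flatten

-- B's streaming fold over the flatten: the state after feeding xs from (some p, c).
theorem streamFold_some (xs : List Int) (p c : Int) :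
    (xs.foldl f_altStep (some p, c)).2 = c + countAdj (p :: xs) := by
  induction xs generalizing p c with
  | nil => simp [countAdj]
  | cons a t ih =>
    simp only [List.foldl_cons, f_altStep]
    rw [ih]
    simp only [countAdj]
    split_ifs <;> ring

theorem streamFold_none (xs : List Int) :
    (xs.foldl f_altStep (none, 0)).2 = countAdj xs := by
  cases xs with
  | nil => simp [countAdj]
  | cons a t =>
    simp only [List.foldl_cons, f_altStep]
    rw [streamFold_some]
    simp

theorem rowfold_eq_flatten (arr2d : List (List Int)) (s : Option Int × Int) :
    arr2d.foldl (fun s row => row.foldl f_altStep s) s = arr2d.flatten.foldl f_altStep s := by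
  induction arr2d generalizing s with
  | nil => rfl
  | cons r t ih => simp [List.foldl_cons, List.foldl_append, ih]

theorem f_alt_eq_countAdj (arr2d : List (List Int)) : f_alt arr2d = countAdj arr2d.flatten := by
  unfold f_alt
  rw [rowfold_eq_flatten, streamFold_none]

-- ===== VERDICT (by name: the statement is the Claim_ definition above) =====
theorem f_spec : Claim_equal_f := by
  intro arr2d _
  unfold Spec_f
  rw [f_eq_countAdj, f_alt_eq_countAdj]
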